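-- pv_equiv track=rewrite | github.com/life4/textdistance | textdistance/algorithms/phonetic.py | _calc_mra
-- ===== SOURCE A (Python) =====
-- from itertools import groupby
--
-- def _calc_mra(word: str) -> str:
--     if not word:
--         return word
--     word = word.upper()
--     word = word[0] + ''.join(c for c in word[1:] if c not in 'AEIOU')
--     # remove repeats like an UNIX uniq
--     word = ''.join(char for char, _ in groupby(word))
--     if len(word) > 6:
--         return word[:3] + word[-3:]
--     return word
-- ===== SOURCE B (Python) =====
-- from itertools import accumulate
--
-- def _calc_mra(word: str) -> str:
--     if not word:
--         return word
--     w = word.upper()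
--     # prefix scan: lasts yields, for each position i, the last non-vowel char
--     # among w[0..i] (falling back to w[0]); each w[i+1] is compared to lasts[i]
--     lasts = accumulate(w, lambda last, c: last if c in 'AEIOU' else c)
--     res = w[0] + ''.join(c for c, last in zip(w[1:], lasts)
--                          if c not in 'AEIOU' and c != last)
--     return res[:3] + res[-3:] if len(res) > 6 else res
-- ===== Notes on version B (the rewrite author's own statement) =====
-- stated objective: alternative
-- what changed: Drops itertools.groupby entirely: B precomputes with itertools.accumulate a prefix scan of the last non-vowel character seen, then builds the body as a single filtered zip of the tail against that scan (keep a char iff it is a consonant differing from its scan value), instead of A's vowel-filter pass followed by a groupby run-collapse pass.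
import Mathlib
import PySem

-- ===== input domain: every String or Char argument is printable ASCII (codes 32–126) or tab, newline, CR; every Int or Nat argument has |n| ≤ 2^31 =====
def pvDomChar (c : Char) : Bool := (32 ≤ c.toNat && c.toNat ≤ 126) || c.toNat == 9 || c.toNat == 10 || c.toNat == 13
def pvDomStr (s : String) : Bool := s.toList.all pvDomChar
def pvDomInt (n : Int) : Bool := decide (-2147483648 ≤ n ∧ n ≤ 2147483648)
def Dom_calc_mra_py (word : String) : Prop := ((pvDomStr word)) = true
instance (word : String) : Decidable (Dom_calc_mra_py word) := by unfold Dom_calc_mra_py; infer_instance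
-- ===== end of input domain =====

-- B replaces A's groupby-dedup pipeline with a prefix scan ("last non-vowel so far")
-- zipped against the tail, filtering by comparison with the scan value; same O(n) cost.


-- ===== PORT A =====
-- c in 'AEIOU' (same membership test appears in both Pythons)
def mraIsVowel (c : Char) : Bool := ['A','E','I','O','U'].contains c

-- ''.join(char for char, _ in groupby(word)) : keep one char per maximal run
def mraGroupUniq (l : List Char) : List Char :=
  match l with
  | [] => []
  | c :: rest => c :: mraGroupUniq (rest.dropWhile (· == c))
termination_by l.length
decreasing_by
  simp only [List.length_cons]
  exact Nat.lt_succ_of_le (List.length_dropWhile_le _ _)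

def calc_mra_py (word : String) : String :=
  if word.toList = [] then word
  else
    match PySem.Chars.upper word.toList with
    | [] => word  -- unreachable: upper preserves length
    | c :: rest =>
      -- word[0] + ''.join(c for c in word[1:] if c not in 'AEIOU')
      let w2 := c :: rest.filter (fun x => !(mraIsVowel x))
      let w3 := mraGroupUniq w2
      -- word[:3] + word[-3:] (exact: taken only when 6 < length, so -3 does not wrap)
      if 6 < w3.length then String.ofList (w3.take 3 ++ w3.drop (w3.length - 3))
      else String.ofList w3

-- ===== PORT B =====
-- itertools.accumulate(w, f): yields the running values acc0 = w[0],
-- acc_{i} = f acc_{i-1} w[i]; ported step for step as a recursive generator.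
def mraAccum : Char → List Char → List Char
  | acc, [] => [acc]
  | acc, c :: rest => acc :: mraAccum (if mraIsVowel c then acc else c) rest

def calc_mra_py_alt (word : String) : String :=
  match PySem.Chars.upper word.toList with
  | [] => word
  | h :: t =>
    let lasts := mraAccum h t
    -- ''.join(c for c, last in zip(w[1:], lasts) if c not in 'AEIOU' and c != last)
    let res := h :: ((t.zip lasts).filter
        (fun p => !(mraIsVowel p.1) && p.1 != p.2)).map Prod.fst
    if 6 < res.length then String.ofList (res.take 3 ++ res.drop (res.length - 3))
    else String.ofList res

-- ===== PRECONDITION & SPEC =====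
def Spec_calc_mra_py (word : String) (out : String) : Prop := out = calc_mra_py_alt word
instance (word : String) (out : String) : Decidable (Spec_calc_mra_py word out) := by unfold Spec_calc_mra_py; infer_instance

-- ===== CLAIM (what is proved, stated in full; the proofs are below) =====
def Claim_equal_calc_mra_py : Prop := ∀ (word : String), Dom_calc_mra_py word → Spec_calc_mra_py word (calc_mra_py word)

-- ===== LEMMAS AND PROOFS =====

lemma mraGroupUniq_nil : mraGroupUniq [] = [] := by rw [mraGroupUniq]

lemma mraGroupUniq_cons (c : Char) (rest : List Char) :
    mraGroupUniq (c :: rest) = c :: mraGroupUniq (rest.dropWhile (· == c)) := by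
  rw [mraGroupUniq]

-- direct form of "dedup against the last filtered char" over a consonant list
def mraUniqTail : List Char → Char → List Char
  | [], _ => []
  | x :: xs, last => if x = last then mraUniqTail xs last else x :: mraUniqTail xs x

lemma mraGroupUniq_dropWhile (ys : List Char) (h : Char) :
    mraGroupUniq (ys.dropWhile (· == h)) = mraUniqTail ys h := by
  induction ys generalizing h with
  | nil => simp [mraGroupUniq_nil, mraUniqTail]
  | cons y ys ih =>
    by_cases hy : y = h
    · subst hy
      simp [mraUniqTail, ih]
    · simp [hy, mraGroupUniq_cons, mraUniqTail, ih]

-- B's zip-with-scan filter equals the dedup-against-last scan of the filtered tail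
lemma mraZipScan_eq (t : List Char) (h : Char) :
    ((t.zip (mraAccum h t)).filter
        (fun p => !(mraIsVowel p.1) && p.1 != p.2)).map Prod.fst =
      mraUniqTail (t.filter (fun x => !(mraIsVowel x))) h := by
  induction t generalizing h with
  | nil => simp [mraUniqTail]
  | cons x xs ih =>
    simp only [mraAccum, List.zip_cons_cons, List.filter_cons]
    by_cases hv : mraIsVowel x = true
    · simpa [hv] using ih h
    · by_cases he : x = h
      · subst he
        simpa [hv, mraUniqTail] using ih x
      · simpa [hv, he, mraUniqTail] using ih x

-- ===== VERDICT (by name: the statement is the Claim_ definition above) =====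
theorem calc_mra_py_spec : Claim_equal_calc_mra_py := by
  intro word _
  unfold Spec_calc_mra_py calc_mra_py calc_mra_py_alt
  cases hw : word.toList with
  | nil => simp [PySem.Chars.upper]
  | cons c rest =>
    simp only [PySem.Chars.upper, List.map_cons, reduceCtorEq, if_false]
    have hkey : mraGroupUniq (PySem.Chars.upperChar c ::
        (rest.map PySem.Chars.upperChar).filter (fun x => !(mraIsVowel x))) =
        PySem.Chars.upperChar c ::
          (((rest.map PySem.Chars.upperChar).zip
              (mraAccum (PySem.Chars.upperChar c)
                (rest.map PySem.Chars.upperChar))).filter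
            (fun p => !(mraIsVowel p.1) && p.1 != p.2)).map Prod.fst := by
      rw [mraGroupUniq_cons, mraGroupUniq_dropWhile, mraZipScan_eq]
    rw [hkey]
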